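-- pv_equiv track=rewrite | github.com/pannakontta/DZ | DZ_5.py | k_islower
-- ===== SOURCE A (Python) =====
-- def k_islower(s: str):
--     i = 0
--     count_low = 0
--     while i < len(s):
--         if not (65 <= ord(s[i]) <= 90):
--             if (97 <= ord(s[i]) <= 122):
--                 count_low += 1
--             i += 1
--         else:
--             return False
--     if count_low > 0:
--         return True
--     else:
--         return False
-- ===== SOURCE B (Python) =====
-- def k_islower(s: str):
--     if any(65 <= ord(c) <= 90 for c in s):
--         return False
--     return any(97 <= ord(c) <= 122 for c in s)
-- ===== Notes on version B (the rewrite author's own statement) =====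
-- stated objective: simpler
-- what changed: Replaces the index-driven while loop with interleaved early exit and a lowercase counter by two independent any() passes, one detecting an uppercase character and one detecting a lowercase character.
import Mathlib
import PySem

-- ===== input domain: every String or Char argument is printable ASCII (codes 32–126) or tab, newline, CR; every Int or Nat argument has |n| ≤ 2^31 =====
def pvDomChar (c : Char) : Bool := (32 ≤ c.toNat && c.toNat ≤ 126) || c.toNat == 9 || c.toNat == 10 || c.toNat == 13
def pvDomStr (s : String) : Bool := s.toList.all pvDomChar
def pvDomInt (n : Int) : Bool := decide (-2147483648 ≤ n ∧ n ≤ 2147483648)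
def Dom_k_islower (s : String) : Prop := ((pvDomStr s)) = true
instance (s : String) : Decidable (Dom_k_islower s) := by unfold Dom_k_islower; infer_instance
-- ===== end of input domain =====

-- B replaces A's interleaved single-scan counter loop by two independent "any" passes (uppercase present? then lowercase present?); objective: simpler.


-- ===== PORT A =====
-- the while loop over index i with the count_low accumulator, as structural recursion over the remaining characters
def kIslowerLoop : List Char → Nat → Bool
  | [], countLow => decide (countLow > 0)
  | c :: rest, countLow =>
    if !(65 ≤ c.toNat && c.toNat ≤ 90) then
      if 97 ≤ c.toNat && c.toNat ≤ 122 then kIslowerLoop rest (countLow + 1)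
      else kIslowerLoop rest countLow
    else false

def k_islower (s : String) : Bool := kIslowerLoop s.toList 0

-- ===== PORT B =====
def k_islower_alt (s : String) : Bool :=
  if s.toList.any (fun c => 65 ≤ c.toNat && c.toNat ≤ 90) then false
  else s.toList.any (fun c => 97 ≤ c.toNat && c.toNat ≤ 122)

-- ===== PRECONDITION & SPEC =====
def Spec_k_islower (s : String) (out : Bool) : Prop := out = k_islower_alt s
instance (s : String) (out : Bool) : Decidable (Spec_k_islower s out) := by unfold Spec_k_islower; infer_instance

-- ===== CLAIM (what is proved, stated in full; the proofs are below) =====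
def Claim_equal_k_islower : Prop := ∀ (s : String), Dom_k_islower s → Spec_k_islower s (k_islower s)

-- ===== LEMMAS AND PROOFS =====
theorem kIslowerLoop_eq (cs : List Char) (countLow : Nat) :
    kIslowerLoop cs countLow =
      if cs.any (fun c => 65 ≤ c.toNat && c.toNat ≤ 90) then false
      else (cs.any (fun c => 97 ≤ c.toNat && c.toNat ≤ 122) || decide (countLow > 0)) := by
  induction cs generalizing countLow with
  | nil => simp [kIslowerLoop]
  | cons c rest ih =>
    simp only [kIslowerLoop, List.any_cons]
    by_cases hu : (65 ≤ c.toNat && c.toNat ≤ 90) = true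
    · simp [hu]
    · simp only [Bool.not_eq_true] at hu
      by_cases hl : (97 ≤ c.toNat && c.toNat ≤ 122) = true
      · simp [hu, hl, ih]
      · simp only [Bool.not_eq_true] at hl
        simp [hu, hl, ih]

-- ===== VERDICT (by name: the statement is the Claim_ definition above) =====
theorem k_islower_spec : Claim_equal_k_islower := by
  intro s _
  unfold Spec_k_islower k_islower k_islower_alt
  rw [kIslowerLoop_eq]
  simp
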